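-- pv_equiv track=rewrite | github.com/MrBrantCode/unitest_baseline | mut_generate/mist_train_cf/cf_44735/solution.py | reverse_sentences
-- ===== SOURCE A (Python) =====
-- def reverse_sentences(text):
--     punctuation = '.!?'
--     sentences = []
--     start = 0
--
--     for i in range(len(text)):
--         if text[i] in punctuation:
--             sentences.append(text[start:i+1].strip())
--             start = i+1
--
--     output = ''
--
--     for sentence in sentences:
--         words = sentence[:-1].split()
--         reverse_sentence = ' '.join(word for word in words[::-1])
--         output += reverse_sentence + sentence[-1] + ' '
--
--     return output.strip()
-- ===== SOURCE B (Python) =====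
-- def reverse_sentences(text):
--     # Single pass: collect the current word, flush words of the current
--     # sentence, and emit a reversed-word sentence at each terminator.
--     pieces = []
--     words = []
--     cur = []
--     for ch in text:
--         if ch in '.!?':
--             if cur:
--                 words.append(''.join(cur))
--                 cur = []
--             words.reverse()
--             pieces.append(' '.join(words) + ch)
--             words = []
--         elif ch.isspace():
--             if cur:
--                 words.append(''.join(cur))
--                 cur = []
--         else:
--             cur.append(ch)
--     return ' '.join(pieces)
-- ===== Notes on version B (the rewrite author's own statement) =====
-- stated objective: alternative
-- what changed: Replaces A's two-pass index scan (slice out each sentence, strip it, then per-sentence split/reverse/join plus a final strip) by a single character-level state machine that builds words directly and never slices, strips or splits.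
import Mathlib
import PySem

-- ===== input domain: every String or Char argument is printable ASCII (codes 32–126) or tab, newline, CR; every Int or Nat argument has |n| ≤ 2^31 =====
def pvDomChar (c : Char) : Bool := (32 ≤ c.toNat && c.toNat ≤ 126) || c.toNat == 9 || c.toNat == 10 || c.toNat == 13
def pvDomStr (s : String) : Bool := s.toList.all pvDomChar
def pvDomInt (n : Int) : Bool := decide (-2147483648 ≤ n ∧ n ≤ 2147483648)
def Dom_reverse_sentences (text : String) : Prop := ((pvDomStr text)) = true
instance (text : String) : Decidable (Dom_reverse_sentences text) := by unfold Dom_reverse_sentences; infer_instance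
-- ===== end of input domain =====

-- B replaces A's two-pass index-scan/slice/strip/split pipeline with a single
-- character-level state machine (alternative decomposition, same O(n) cost).

-- ===== PORT A =====
-- punctuation = '.!?' ; 'text[i] in punctuation' is char membership in this 3-char string
def pvPunct : List Char := ['.', '!', '?']

-- body of A's first for-loop: state = (sentences, start)
def pvAstep (cs : List Char) (st : List (List Char) × Int) (i : Int) :
    List (List Char) × Int :=
  if PySem.List.pyGetD cs i ' ' ∈ pvPunct then
    (st.1 ++ [PySem.Chars.strip (PySem.List.slice cs (some st.2) (some (i + 1)))], i + 1)
  else st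

def reverse_sentences (text : String) : String :=
  let cs := text.toList
  let sentences :=
    ((PySem.List.pyRange 0 (cs.length : Int) 1).foldl (pvAstep cs) ([], 0)).1
  -- second loop: words[::-1] is List.reverse (PySem.List.slice?_none_none_neg_one)
  let out := sentences.foldl
    (fun out s =>
      out ++ PySem.Chars.join [' ']
              ((PySem.Chars.split₀ (PySem.List.slice s none (some (-1)))).reverse)
          ++ [PySem.List.pyGetD s (-1) ' '] ++ [' ']) []
  String.ofList (PySem.Chars.strip out)

-- ===== PORT B =====
-- B's copy of the terminator string '.!?' ('ch in ".!?"' is char membership)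
def pvPunctB : List Char := ['.', '!', '?']

-- body of B's single for-loop: state = (pieces, words, cur); 'ch.isspace()' is
-- PySem.Chars.isspace ch (exact: strIsspace [ch] = isspace ch)
def pvBstep (st : List (List Char) × List (List Char) × List Char) (ch : Char) :
    List (List Char) × List (List Char) × List Char :=
  if ch ∈ pvPunctB then
    let ws := if st.2.2.isEmpty then st.2.1 else st.2.1 ++ [st.2.2]
    (st.1 ++ [PySem.Chars.join [' '] ws.reverse ++ [ch]], [], [])
  else if PySem.Chars.isspace ch then
    (st.1, (if st.2.2.isEmpty then st.2.1 else st.2.1 ++ [st.2.2]), [])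
  else
    (st.1, st.2.1, st.2.2 ++ [ch])

def reverse_sentences_alt (text : String) : String :=
  String.ofList
    (PySem.Chars.join [' '] (text.toList.foldl pvBstep ([], [], [])).1)

-- ===== PRECONDITION & SPEC =====
def Spec_reverse_sentences (text : String) (out : String) : Prop := out = reverse_sentences_alt text
instance (text : String) (out : String) : Decidable (Spec_reverse_sentences text out) := by unfold Spec_reverse_sentences; infer_instance

-- ===== CLAIM (what is proved, stated in full; the proofs are below) =====
def Claim_equal_reverse_sentences : Prop := ∀ (text : String), Dom_reverse_sentences text → Spec_reverse_sentences text (reverse_sentences text)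

-- ===== LEMMAS AND PROOFS =====

-- flush the current word into the word list (shared shape of both branches of B)
def pvFlush (ws : List (List Char)) (cur : List Char) : List (List Char) :=
  if cur.isEmpty then ws else ws ++ [cur]

-- the contribution of one sentence with body `body` and terminator `c`
def pvPiece (body : List Char) (c : Char) : List Char :=
  PySem.Chars.join [' '] (PySem.Chars.split₀ body).reverse ++ [c]

-- sentence pieces, computed from raw bodies (reference segmentation)
def pvSegsA : List Char → List Char → List (List Char)
  | [], _ => []
  | c :: rest, body =>
    if c ∈ pvPunct then pvPiece body c :: pvSegsA rest []
    else pvSegsA rest (body ++ [c])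

-- sentence pieces, computed from B's word-level state
def pvSegsW : List Char → List (List Char) → List Char → List (List Char)
  | [], _, _ => []
  | c :: rest, ws, cur =>
    if c ∈ pvPunct then
      (PySem.Chars.join [' '] (pvFlush ws cur).reverse ++ [c]) :: pvSegsW rest [] []
    else if PySem.Chars.isspace c then pvSegsW rest (pvFlush ws cur) []
    else pvSegsW rest ws (cur ++ [c])

-- A's raw stripped sentences
def pvRawSegs : List Char → List Char → List (List Char)
  | [], _ => []
  | c :: rest, body =>
    if c ∈ pvPunct then PySem.Chars.strip (body ++ [c]) :: pvRawSegs rest []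
    else pvRawSegs rest (body ++ [c])

theorem pvPunct_not_space {c : Char} (h : c ∈ pvPunct) : PySem.Chars.isspace c = false := by
  simp only [pvPunct, List.mem_cons, List.not_mem_nil, or_false] at h
  rcases h with h | h | h <;> subst h <;> decide

-- accumulator lemma for split₀.go
theorem pvGo_acc (l : List Char) (cur : List Char) (acc : List (List Char)) :
    PySem.Chars.split₀.go l cur acc = acc.reverse ++ PySem.Chars.split₀.go l cur [] := by
  induction l generalizing cur acc with
  | nil =>
    simp only [PySem.Chars.split₀.go]
    split <;> simp
  | cons c rest ih =>
    simp only [PySem.Chars.split₀.go]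
    split
    · split
      · exact ih [] acc
      · rw [ih [] (cur.reverse :: acc), ih [] [cur.reverse]]
        simp
    · exact ih (c :: cur) acc

-- B's word machine computes split₀
theorem pvSegsW_eq_segsA (cs : List Char) (ws : List (List Char)) (cur : List Char)
    (body : List Char)
    (H : ∀ tail, ws ++ PySem.Chars.split₀.go tail cur.reverse [] =
          PySem.Chars.split₀ (body ++ tail)) :
    pvSegsW cs ws cur = pvSegsA cs body := by
  induction cs generalizing ws cur body with
  | nil => rfl
  | cons c rest ih =>
    have hflush : pvFlush ws cur = PySem.Chars.split₀ body := by
      have h0 := H []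
      simp only [PySem.Chars.split₀.go, List.append_nil] at h0
      rw [pvFlush]
      rcases cur with _ | ⟨a, t⟩
      · simpa using h0
      · simp only [List.isEmpty_cons] at h0 ⊢
        simpa using h0
    simp only [pvSegsW, pvSegsA]
    split
    · rename_i hc
      rw [hflush]
      rw [ih [] [] [] (fun tail => by simp [PySem.Chars.split₀])]
      simp [pvPiece]
    · rename_i hc
      split
      · rename_i hsp
        rw [ih (pvFlush ws cur) [] (body ++ [c]) ?_]
        intro tail
        have h1 := H (c :: tail)
        rw [List.append_assoc]
        simp only [List.singleton_append]
        rw [← h1]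
        simp only [PySem.Chars.split₀.go, hsp]
        rcases cur with _ | ⟨a, t⟩
        · simp [pvFlush]
        · rw [if_pos trivial, if_neg (by simp), pvGo_acc tail [] [(a :: t).reverse.reverse]]
          simp [pvFlush]
      · rename_i hsp
        rw [ih ws (cur ++ [c]) (body ++ [c]) ?_]
        intro tail
        have h1 := H (c :: tail)
        rw [List.append_assoc]
        simp only [List.singleton_append]
        rw [← h1]
        simp only [PySem.Chars.split₀.go, hsp, List.reverse_append]
        simp

theorem pvB_fold (cs : List Char) (p ws : List (List Char)) (cur : List Char) :
    (cs.foldl pvBstep (p, ws, cur)).1 = p ++ pvSegsW cs ws cur := by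
  induction cs generalizing p ws cur with
  | nil => simp [pvSegsW]
  | cons c rest ih =>
    simp only [List.foldl_cons, pvBstep, pvSegsW,
      show pvPunctB = pvPunct from rfl]
    split
    · rw [ih]; simp [pvFlush]
    · split
      · rw [ih]; simp [pvFlush]
      · rw [ih]

theorem pvA_fold (suf pre body : List Char) (sens : List (List Char))
    (hsfx : body <:+ pre) :
    ((PySem.List.pyRange (pre.length : Int) (((pre ++ suf).length : Nat) : Int) 1).foldl
        (pvAstep (pre ++ suf)) (sens, (pre.length : Int) - (body.length : Int))).1
      = sens ++ pvRawSegs suf body := by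
  induction suf generalizing pre body sens with
  | nil =>
    simp [PySem.List.pyRange, pvRawSegs]
  | cons c rest ih =>
    obtain ⟨q, hq⟩ := hsfx
    have hlt : (pre.length : Int) < ((pre ++ c :: rest).length : Nat) := by
      simp only [List.length_append, List.length_cons]
      omega
    rw [PySem.List.pyRange_one_cons hlt, List.foldl_cons]
    have hget : PySem.List.pyGetD (pre ++ c :: rest) (pre.length : Int) ' ' = c := by
      rw [PySem.List.pyGetD_natCast]
      simp [List.getD_eq_getElem?_getD]
    have hbl : body.length ≤ pre.length := by
      subst hq; simp
    rw [pvAstep, hget]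
    by_cases hc : c ∈ pvPunct
    · rw [if_pos hc]
      have hslice : PySem.List.slice (pre ++ c :: rest)
          (some ((pre.length : Int) - (body.length : Int))) (some ((pre.length : Int) + 1))
          = body ++ [c] := by
        rw [PySem.List.slice_toNat _ (by omega) (by omega)]
        have h1 : ((pre.length : Int) - (body.length : Int)).toNat = q.length := by
          subst hq; simp only [List.length_append]; omega
        have h2 : ((pre.length : Int) + 1).toNat = pre.length + 1 := by omega
        rw [h1, h2, ← hq, List.append_assoc, List.drop_left]
        rw [List.take_append]
        have h3 : (q ++ body).length + 1 - q.length = body.length + 1 := by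
          simp only [List.length_append]; omega
        rw [h3, List.take_of_length_le (by omega)]
        simp
      rw [hslice]
      have hkey := ih (pre ++ [c]) [] (sens ++ [PySem.Chars.strip (body ++ [c])])
        List.nil_suffix
      simp only [List.append_assoc, List.singleton_append, List.length_append,
        List.length_cons, List.length_nil, Nat.cast_add, Nat.cast_one, Nat.cast_zero,
        Int.sub_zero] at hkey ⊢
      norm_num at hkey ⊢
      rw [hkey]
      simp [pvRawSegs, hc]
    · rw [if_neg hc]
      have hkey := ih (pre ++ [c]) (body ++ [c]) sens
        (by exact ⟨q, by rw [← List.append_assoc, hq]⟩)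
      simp only [List.append_assoc, List.singleton_append, List.length_append,
        List.length_cons, List.length_nil, Nat.cast_add, Nat.cast_one] at hkey ⊢
      norm_num at hkey ⊢
      rw [hkey]
      simp [pvRawSegs, hc]

theorem pvLstrip_concat (body : List Char) (c : Char) (hc : PySem.Chars.isspace c = false) :
    PySem.Chars.strip (body ++ [c]) = PySem.Chars.lstrip body ++ [c] := by
  have hl : PySem.Chars.lstrip (body ++ [c]) = PySem.Chars.lstrip body ++ [c] := by
    induction body with
    | nil => simp [PySem.Chars.lstrip, List.dropWhile, hc]
    | cons a t iht =>
      simp only [PySem.Chars.lstrip, List.cons_append, List.dropWhile] at iht ⊢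
      cases hsp : PySem.Chars.isspace a <;> simp [iht]
  rw [PySem.Chars.strip, hl, PySem.Chars.rstrip]
  simp [hc]

theorem pvSplit_lstrip (l : List Char) :
    PySem.Chars.split₀ (PySem.Chars.lstrip l) = PySem.Chars.split₀ l := by
  induction l with
  | nil => rfl
  | cons a t iht =>
    simp only [PySem.Chars.lstrip, List.dropWhile] at iht ⊢
    cases hsp : PySem.Chars.isspace a with
    | false => simp
    | true =>
      rw [iht]
      simp [PySem.Chars.split₀, PySem.Chars.split₀.go, hsp]

-- per-word facts about split₀
theorem pvSplit_words (l : List Char) :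
    ∀ w ∈ PySem.Chars.split₀ l, w ≠ [] ∧ ∀ ch ∈ w, PySem.Chars.isspace ch = false := by
  have go_ok : ∀ (l cur : List Char) (acc : List (List Char)),
      (∀ ch ∈ cur, PySem.Chars.isspace ch = false) →
      (∀ w ∈ acc, w ≠ [] ∧ ∀ ch ∈ w, PySem.Chars.isspace ch = false) →
      ∀ w ∈ PySem.Chars.split₀.go l cur acc,
        w ≠ [] ∧ ∀ ch ∈ w, PySem.Chars.isspace ch = false := by
    intro l
    induction l with
    | nil =>
      intro cur acc hcur hacc w hw
      simp only [PySem.Chars.split₀.go] at hw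
      split at hw
      · exact hacc w (by simpa using hw)
      · rename_i hne
        simp only [List.mem_reverse, List.mem_cons] at hw
        rcases hw with h | h
        · subst h
          refine ⟨by simpa using hne, ?_⟩
          intro ch hch
          exact hcur ch (by simpa using hch)
        · exact hacc w h
    | cons c rest ih =>
      intro cur acc hcur hacc w hw
      simp only [PySem.Chars.split₀.go] at hw
      split at hw
      · rename_i hsp
        split at hw
        · exact ih [] acc (by simp) hacc w hw
        · rename_i hne
          refine ih [] (cur.reverse :: acc) (by simp) ?_ w hw
          intro v hv
          rcases List.mem_cons.mp hv with h | h
          · subst h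
            refine ⟨by simpa using hne, ?_⟩
            intro ch hch
            exact hcur ch (by simpa using hch)
          · exact hacc v h
      · rename_i hsp
        refine ih (c :: cur) acc ?_ hacc w hw
        intro ch hch
        rcases List.mem_cons.mp hch with h | h
        · subst h; simpa using hsp
        · exact hcur ch h
  exact go_ok l [] [] (by simp) (by simp)

theorem pvRaw_map (cs body : List Char) :
    (pvRawSegs cs body).map
      (fun s => PySem.Chars.join [' ']
          ((PySem.Chars.split₀ (PySem.List.slice s none (some (-1)))).reverse)
        ++ [PySem.List.pyGetD s (-1) ' '] ++ [' '])
      = (pvSegsA cs body).map (· ++ [' ']) := by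
  induction cs generalizing body with
  | nil => rfl
  | cons c rest ih =>
    simp only [pvRawSegs, pvSegsA]
    by_cases hc : c ∈ pvPunct
    · rw [if_pos hc, if_pos hc, List.map_cons, List.map_cons, ih]
      congr 1
      rw [pvLstrip_concat body c (pvPunct_not_space hc)]
      rw [PySem.List.slice_to_neg_one, List.dropLast_concat,
        PySem.List.pyGetD_neg_one_append_singleton, pvSplit_lstrip]
      simp [pvPiece]
    · rw [if_neg hc, if_neg hc, ih]

theorem pvLstrip_id (l : List Char) (hne : l ≠ [])
    (hh : PySem.Chars.isspace l.headI = false) : PySem.Chars.lstrip l = l := by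
  rcases l with _ | ⟨a, t⟩
  · exact absurd rfl hne
  · simp only [List.headI_cons] at hh
    simp [PySem.Chars.lstrip, List.dropWhile, hh]

theorem pvRstrip_space (l : List Char) :
    PySem.Chars.rstrip (l ++ [' ']) = PySem.Chars.rstrip l := by
  simp [PySem.Chars.rstrip,
    show PySem.Chars.isspace ' ' = true from by decide]

theorem pvRstrip_id (l : List Char) (hne : l ≠ [])
    (hl : PySem.Chars.isspace (l.getLast?.getD ' ') = false) :
    PySem.Chars.rstrip l = l := by
  rcases List.eq_nil_or_concat l with h | ⟨Y, b, h⟩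
  · exact absurd h hne
  · subst h
    simp only [List.concat_eq_append] at hl ⊢
    rw [List.getLast?_concat] at hl
    simp only [Option.getD_some] at hl
    simp [PySem.Chars.rstrip, hl]

theorem pvStrip_flat (pieces : List (List Char))
    (h : ∀ p ∈ pieces, p ≠ [] ∧ PySem.Chars.isspace p.headI = false ∧
          PySem.Chars.isspace (p.getLast?.getD ' ') = false) :
    PySem.Chars.strip ((pieces.map (· ++ [' '])).flatten)
      = PySem.Chars.join [' '] pieces := by
  have hflat : ∀ ps : List (List Char), ps ≠ [] →
      ((ps.map (· ++ [' '])).flatten) = List.intercalate [' '] ps ++ [' '] := by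
    intro ps
    induction ps with
    | nil => simp
    | cons p t iht =>
      intro _
      rcases t with _ | ⟨q, t'⟩
      · simp [List.intercalate]
      · calc ((p :: q :: t').map (· ++ [' '])).flatten
            = p ++ [' '] ++ ((q :: t').map (· ++ [' '])).flatten := by simp
          _ = p ++ [' '] ++ (List.intercalate [' '] (q :: t') ++ [' ']) := by
                rw [iht (by simp)]
          _ = List.intercalate [' '] (p :: q :: t') ++ [' '] := by
                rw [show List.intercalate [' '] (p :: q :: t')
                    = p ++ [' '] ++ List.intercalate [' '] (q :: t')
                  from by simp [List.intercalate, List.intersperse]]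
                simp
  rcases pieces with _ | ⟨p, ps⟩
  · simp [PySem.Chars.strip, PySem.Chars.lstrip, PySem.Chars.rstrip, PySem.Chars.join,
      List.intercalate]
  · have hX : ∀ qs : List (List Char),
        (∀ p ∈ qs, p ≠ [] ∧ PySem.Chars.isspace p.headI = false ∧
          PySem.Chars.isspace (p.getLast?.getD ' ') = false) → qs ≠ [] →
        List.intercalate [' '] qs ≠ [] ∧
        PySem.Chars.isspace (List.intercalate [' '] qs).headI = false ∧
        PySem.Chars.isspace ((List.intercalate [' '] qs).getLast?.getD ' ') = false := by
      intro qs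
      induction qs with
      | nil => simp
      | cons q t iht =>
        intro hq _
        obtain ⟨hqne, hqh, hql⟩ := hq q (by simp)
        rcases t with _ | ⟨r, t'⟩
        · simpa [List.intercalate] using ⟨hqne, hqh, hql⟩
        · obtain ⟨h1, h2, h3⟩ := iht (fun p hp => hq p (by simp [hp])) (by simp)
          rw [show List.intercalate [' '] (q :: r :: t')
              = q ++ ([' '] ++ List.intercalate [' '] (r :: t'))
            from by simp [List.intercalate, List.intersperse]]
          rcases List.eq_nil_or_concat (List.intercalate [' '] (r :: t')) with hI | ⟨Y, b, hI⟩
          · exact absurd hI h1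
          · simp only [List.concat_eq_append] at hI
            rw [hI] at h3 ⊢
            rw [List.getLast?_concat] at h3
            simp only [Option.getD_some] at h3
            refine ⟨by simp [hqne], ?_, ?_⟩
            · rcases q with _ | ⟨a, t''⟩
              · exact absurd rfl hqne
              · simpa using hqh
            · rw [show (q ++ ([' '] ++ (Y ++ [b])) : List Char)
                  = (q ++ ([' '] ++ Y)) ++ [b] from by simp]
              rw [List.getLast?_concat]
              simpa using h3
    obtain ⟨h1, h2, h3⟩ := hX (p :: ps) h (by simp)
    rw [hflat (p :: ps) (by simp)]
    rw [PySem.Chars.strip]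
    rw [pvLstrip_id _ (by simp [h1]) (by
      rcases hint : List.intercalate [' '] (p :: ps) with _ | ⟨a, t⟩
      · exact absurd hint h1
      · rw [hint] at h2; simpa using h2)]
    rw [pvRstrip_space, pvRstrip_id _ h1 h3]
    simp [PySem.Chars.join]

theorem pvSegsA_ok (cs body : List Char) :
    ∀ p ∈ pvSegsA cs body, p ≠ [] ∧ PySem.Chars.isspace p.headI = false ∧
      PySem.Chars.isspace (p.getLast?.getD ' ') = false := by
  induction cs generalizing body with
  | nil => simp [pvSegsA]
  | cons c rest ih =>
    intro p hp
    simp only [pvSegsA] at hp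
    by_cases hc : c ∈ pvPunct
    · rw [if_pos hc] at hp
      rcases List.mem_cons.mp hp with h | h
      · subst h
        have hcsp := pvPunct_not_space hc
        refine ⟨by simp [pvPiece], ?_, by simp [pvPiece, hcsp]⟩
        rw [pvPiece]
        rcases hws : (PySem.Chars.split₀ body).reverse with _ | ⟨w, ws'⟩
        · simpa [PySem.Chars.join, List.intercalate] using hcsp
        · obtain ⟨hwne, hwsp⟩ := pvSplit_words body w
            (by rw [← List.mem_reverse, hws]; simp)
          rcases w with _ | ⟨a, t⟩
          · exact absurd rfl hwne
          · have : PySem.Chars.join [' '] ((a :: t) :: ws') = a :: (t ++ ([' '].intercalate ws' |> fun r => if ws' = [] then [] else ' ' :: r)) := by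
              rcases ws' with _ | ⟨r, t'⟩
              · simp [PySem.Chars.join, List.intercalate]
              · simp [PySem.Chars.join, List.intercalate, List.intersperse]
            rw [PySem.Chars.join] at this ⊢
            rcases ws' with _ | ⟨r, t'⟩
            · simpa [List.intercalate] using hwsp a (by simp)
            · rw [show List.intercalate [' '] ((a :: t) :: r :: t') = (a :: t) ++ ([' '] ++ List.intercalate [' '] (r :: t'))
                from by simp [List.intercalate, List.intersperse]]
              simpa using hwsp a (by simp)
      · exact ih [] p h
    · rw [if_neg hc] at hp
      exact ih (body ++ [c]) p hp

theorem pvAout_flat (sens : List (List Char)) (init : List Char) :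
    sens.foldl
      (fun out s =>
        out ++ PySem.Chars.join [' ']
                ((PySem.Chars.split₀ (PySem.List.slice s none (some (-1)))).reverse)
            ++ [PySem.List.pyGetD s (-1) ' '] ++ [' ']) init
    = init ++ (sens.map (fun s =>
        PySem.Chars.join [' ']
            ((PySem.Chars.split₀ (PySem.List.slice s none (some (-1)))).reverse)
          ++ [PySem.List.pyGetD s (-1) ' '] ++ [' '])).flatten := by
  induction sens generalizing init with
  | nil => simp
  | cons a t ih => simp

-- ===== VERDICT (by name: the statement is the Claim_ definition above) =====
theorem reverse_sentences_spec : Claim_equal_reverse_sentences := by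
  intro text _
  show reverse_sentences text = reverse_sentences_alt text
  rw [reverse_sentences, reverse_sentences_alt]
  have hA := pvA_fold text.toList [] [] [] List.nil_suffix
  simp only [List.nil_append, List.length_nil, Nat.cast_zero, Int.sub_zero] at hA
  rw [hA, pvAout_flat, List.nil_append, pvRaw_map, pvStrip_flat _ (pvSegsA_ok _ _)]
  rw [pvB_fold, List.nil_append,
    pvSegsW_eq_segsA _ [] [] [] (fun tail => by simp [PySem.Chars.split₀])]
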